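-- pv_equiv track=rewrite | github.com/xc-structural-engineering/pyCost | pycost/utils/pylatex_utils.py | ascii2latex
-- ===== SOURCE A (Python) =====
-- def ascii2latex(s):
--     '''Return the equivalent latex code.'''
--     tmp= s
--     # if type(s) == textStr:
--     #     # Ignore errors even if the string is not proper UTF-8 or has
--     #     # broken marker bytes.
--     #     # Python built-in function unicode() can do this.
--     #     tmp= unicode(s, encoding= 'utf-8', errors='ignore')
--     # else:
--     #     # Assume the value object has proper __unicode__() method
--     #     tmp= unicode(s)
--     #tmp= s.encode('ascii',errors='replace') #unicode(s, errors='replace')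
--     if(tmp.find('\\')): # Has scape characters.
--      tmp.replace('\\(','(')
--     if(tmp.find('\\')):
--      tmp.replace('\\)',')')
--     if(tmp.find('\\')):
--      tmp.replace('\\[','[')
--     if(tmp.find('\\')):
--      tmp.replace('\\]',']')
--     retval= ''
--     for c in tmp:
--         if(c=='_'): retval+= '\\'
--         if(c=='%'): retval+= '\\'
--         if(c=='$'): retval+= '\\'
--         if(c=='&'): retval+= '\\'
--         if(c=='>'):
--             retval+= '$>$'
--             continue
--         retval+= c
--     return retval
-- ===== SOURCE B (Python) =====
-- def ascii2latex(s):
--     '''Return the equivalent latex code.'''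
--     return (s.replace('&', '\\&')
--              .replace('%', '\\%')
--              .replace('$', '\\$')
--              .replace('_', '\\_')
--              .replace('>', '$>$'))
-- ===== Notes on version B (the rewrite author's own statement) =====
-- stated objective: idiomatic
-- what changed: Replaced A's per-character loop (with its four dead find/replace statements) by a chain of five full-string str.replace passes, with the greater-than replacement done last so the dollar signs it inserts are never re-escaped.
import Mathlib
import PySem

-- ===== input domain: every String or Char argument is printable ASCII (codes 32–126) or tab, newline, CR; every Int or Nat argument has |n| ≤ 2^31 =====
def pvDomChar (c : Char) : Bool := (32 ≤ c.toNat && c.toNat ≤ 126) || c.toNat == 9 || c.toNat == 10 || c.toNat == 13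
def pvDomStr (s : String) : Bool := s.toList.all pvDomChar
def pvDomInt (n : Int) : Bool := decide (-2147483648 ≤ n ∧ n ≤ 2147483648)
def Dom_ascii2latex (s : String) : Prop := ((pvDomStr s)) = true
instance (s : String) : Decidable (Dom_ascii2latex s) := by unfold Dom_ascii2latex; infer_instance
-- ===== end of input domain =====

-- B replaces A's per-character escaping loop by five chained full-string str.replace passes (idiomatic; '>' last so its inserted '$' are not re-escaped).

-- ===== PORT A =====
-- the body of A's 'for c in tmp' loop, step for step (each 'if' appends to retval in A's order)
def ascii2latexStep (r : List Char) (c : Char) : List Char :=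
  let r := if c = '_' then r ++ ['\\'] else r
  let r := if c = '%' then r ++ ['\\'] else r
  let r := if c = '$' then r ++ ['\\'] else r
  let r := if c = '&' then r ++ ['\\'] else r
  if c = '>' then r ++ ['$', '>', '$'] else r ++ [c]

def ascii2latex (s : String) : String :=
  let tmp := s
  -- Python's four guarded 'tmp.replace(…)' statements compute a value and DISCARD it (no assignment); ported as discarded lets
  let _ := if PySem.Str.find tmp "\\" ≠ 0 then some (PySem.Str.replace tmp "\\(" "(") else none
  let _ := if PySem.Str.find tmp "\\" ≠ 0 then some (PySem.Str.replace tmp "\\)" ")") else none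
  let _ := if PySem.Str.find tmp "\\" ≠ 0 then some (PySem.Str.replace tmp "\\[" "[") else none
  let _ := if PySem.Str.find tmp "\\" ≠ 0 then some (PySem.Str.replace tmp "\\]" "]") else none
  let retval := tmp.toList.foldl ascii2latexStep []
  String.ofList retval

-- ===== PORT B =====
def ascii2latex_alt (s : String) : String :=
  PySem.Str.replace
    (PySem.Str.replace
      (PySem.Str.replace
        (PySem.Str.replace
          (PySem.Str.replace s "&" "\\&")
          "%" "\\%")
        "$" "\\$")
      "_" "\\_")
    ">" "$>$"

-- ===== PRECONDITION & SPEC =====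
def Spec_ascii2latex (s : String) (out : String) : Prop := out = ascii2latex_alt s
instance (s : String) (out : String) : Decidable (Spec_ascii2latex s out) := by unfold Spec_ascii2latex; infer_instance

-- ===== CLAIM (what is proved, stated in full; the proofs are below) =====
def Claim_equal_ascii2latex : Prop := ∀ (s : String), Dom_ascii2latex s → Spec_ascii2latex s (ascii2latex s)

-- ===== LEMMAS AND PROOFS =====

-- what A emits for one character
def escAll (c : Char) : List Char :=
  if c = '_' then ['\\', '_']
  else if c = '%' then ['\\', '%']
  else if c = '$' then ['\\', '$']
  else if c = '&' then ['\\', '&']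
  else if c = '>' then ['$', '>', '$']
  else [c]

-- what one single-character replace emits per character
def sub1 (c : Char) (new : List Char) : Char → List Char :=
  fun x => if x = c then new else [x]

theorem ascii2latexStep_eq (r : List Char) (c : Char) :
    ascii2latexStep r c = r ++ escAll c := by
  unfold ascii2latexStep escAll
  by_cases h1 : c = '_'
  · subst h1; simp
  · by_cases h2 : c = '%'
    · subst h2; simp
    · by_cases h3 : c = '$'
      · subst h3; simp
      · by_cases h4 : c = '&'
        · subst h4; simp
        · by_cases h5 : c = '>'
          · subst h5; simp
          · simp [h1, h2, h3, h4, h5]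

theorem portA_eq (s : String) :
    (ascii2latex s).toList = s.toList.flatMap escAll := by
  have hstep : ascii2latexStep = fun r c => r ++ escAll c := by
    funext r c; exact ascii2latexStep_eq r c
  simp only [ascii2latex, hstep, String.toList_ofList]
  rw [PySem.List.foldl_append_eq_flatMap]
  simp

-- replace with a single-character pattern IS a per-character flatMap
theorem replace_go_single (c : Char) (new : List Char) :
    ∀ (l : List Char) (fuel : Nat) (acc : List Char), l.length ≤ fuel →
      PySem.Chars.replace.go [c] new fuel l acc = acc.reverse ++ l.flatMap (sub1 c new) := by
  intro l
  induction l with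
  | nil => intro fuel acc _; cases fuel <;> simp [PySem.Chars.replace.go]
  | cons x t ih =>
    intro fuel acc h
    cases fuel with
    | zero => simp at h
    | succ m =>
      rw [PySem.Chars.replace.go]
      by_cases hx : x = c
      · subst hx
        have hpre : List.isPrefixOf [x] (x :: t) = true := by
          simp [List.isPrefixOf]
        simp only [hpre, if_true, List.length_cons, List.length_nil, List.drop_succ_cons, List.drop_zero]
        rw [ih m (new.reverse ++ acc) (by simpa using h)]
        simp [sub1]
      · have hpre : List.isPrefixOf [c] (x :: t) = false := by
          simp [List.isPrefixOf]; exact fun h => hx h.symm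
        simp only [hpre, Bool.false_eq_true, if_false]
        rw [ih m (x :: acc) (by simpa using h)]
        simp [sub1, hx]

theorem replace_single (s : List Char) (c : Char) (new : List Char) :
    PySem.Chars.replace s [c] new = s.flatMap (sub1 c new) := by
  rw [PySem.Chars.replace]
  simp only [List.isEmpty_cons, Bool.false_eq_true, if_false]
  simpa using replace_go_single c new s s.length [] (le_refl _)

-- the five chained single-character replaces collapse to one flatMap of escAll
theorem chain_eq (xs : List Char) :
    ((((xs.flatMap (sub1 '&' ['\\', '&'])).flatMap (sub1 '%' ['\\', '%'])).flatMap
        (sub1 '$' ['\\', '$'])).flatMap (sub1 '_' ['\\', '_'])).flatMap (sub1 '>' ['$', '>', '$'])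
      = xs.flatMap escAll := by
  induction xs with
  | nil => simp
  | cons x t ih =>
    simp only [List.flatMap_cons, List.flatMap_append, ih]
    congr 1
    by_cases h1 : x = '_'
    · subst h1; decide
    · by_cases h2 : x = '%'
      · subst h2; decide
      · by_cases h3 : x = '$'
        · subst h3; decide
        · by_cases h4 : x = '&'
          · subst h4; decide
          · by_cases h5 : x = '>'
            · subst h5; decide
            · simp [sub1, escAll, h1, h2, h3, h4, h5]

theorem portB_eq (s : String) :
    (ascii2latex_alt s).toList = s.toList.flatMap escAll := by
  have h1 : ("&" : String).toList = ['&'] := rfl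
  have h2 : ("\\&" : String).toList = ['\\', '&'] := rfl
  have h3 : ("%" : String).toList = ['%'] := rfl
  have h4 : ("\\%" : String).toList = ['\\', '%'] := rfl
  have h5 : ("$" : String).toList = ['$'] := rfl
  have h6 : ("\\$" : String).toList = ['\\', '$'] := rfl
  have h7 : ("_" : String).toList = ['_'] := rfl
  have h8 : ("\\_" : String).toList = ['\\', '_'] := rfl
  have h9 : (">" : String).toList = ['>'] := rfl
  have h10 : ("$>$" : String).toList = ['$', '>', '$'] := rfl
  simp only [ascii2latex_alt, PySem.Str.toList_replace, h1, h2, h3, h4, h5, h6, h7, h8, h9, h10,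
    replace_single]
  exact chain_eq s.toList

-- ===== VERDICT (by name: the statement is the Claim_ definition above) =====
theorem ascii2latex_spec : Claim_equal_ascii2latex := by
  intro s _
  unfold Spec_ascii2latex
  apply String.ext
  rw [portA_eq, portB_eq]
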